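-- pv_equiv track=rewrite | github.com/MrBrantCode/unitest_baseline | mut_generate/mist_train_cf/cf_55225/solution.py | solve
-- ===== SOURCE A (Python) =====
-- def solve(lst):
--     def is_prime(n):
--         if n <= 1:
--             return False
--         if n == 2:
--             return True
--         if n % 2 == 0:
--             return False
--         for i in range(3, int(n ** 0.5) + 1, 2):
--             if n % i == 0:
--                 return False
--         return True
--
--     def sum_digits(n):
--         return sum(int(digit) for digit in str(n))
--
--     max_prime = max((num for num in lst if is_prime(num)), default=0)
--     return sum_digits(max_prime)
-- ===== SOURCE B (Python) =====
-- def solve(lst):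
--     def is_prime(n):
--         if n <= 1:
--             return False
--         if n == 2:
--             return True
--         if n % 2 == 0:
--             return False
--         for i in range(3, int(n ** 0.5) + 1, 2):
--             if n % i == 0:
--                 return False
--         return True
--
--     best = 0
--     for v in sorted(lst, reverse=True):
--         if is_prime(v):
--             best = v
--             break
--     total = 0
--     while best > 0:
--         best, d = divmod(best, 10)
--         total += d
--     return total
-- ===== Notes on version B (the rewrite author's own statement) =====
-- stated objective: faster
-- what changed: Replaces the filtered max-scan with a descending sort followed by an early-exit scan that trial-divides only until the first prime is found, and computes the digit sum with an arithmetic divmod loop instead of converting to a string.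
import Mathlib
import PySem

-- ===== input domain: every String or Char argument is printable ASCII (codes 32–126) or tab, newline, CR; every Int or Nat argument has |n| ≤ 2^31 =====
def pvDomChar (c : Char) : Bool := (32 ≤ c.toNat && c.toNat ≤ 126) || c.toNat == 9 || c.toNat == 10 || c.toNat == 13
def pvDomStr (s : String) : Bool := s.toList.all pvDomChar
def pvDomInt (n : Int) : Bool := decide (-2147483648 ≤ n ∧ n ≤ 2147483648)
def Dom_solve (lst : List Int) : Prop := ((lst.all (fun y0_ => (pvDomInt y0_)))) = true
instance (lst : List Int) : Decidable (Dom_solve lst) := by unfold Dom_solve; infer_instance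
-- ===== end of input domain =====

-- B replaces A's filtered max-scan (which trial-divides every element) by sort-descending +
-- first-prime early-exit scan, and A's string-based digit sum by an arithmetic divmod loop.

-- helper shared verbatim by Source A and Source B: is_prime's √n trial division.
-- int(n ** 0.5) is ported as Int.sqrt n, exact for 0 ≤ n ≤ 2^31 (double sqrt is correctly
-- rounded and the truncation cannot cross an integer below 2^52).
def isPrime (n : Int) : Bool :=
  if n ≤ 1 then false
  else if n = 2 then true
  else if PySem.Int.mod n 2 = 0 then false
  else !((PySem.List.pyRange 3 (Int.sqrt n + 1) 2).any (fun i => PySem.Int.mod n i = 0))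

-- ===== PORT A =====
-- sum(int(digit) for digit in str(n)); int(digit) = (ofChars? [c]).getD 0 — the default is
-- never used in solve: the argument is 0 or a prime, hence nonnegative, so every char is a digit.
def aSumDigits (n : Int) : Int :=
  ((PySem.Int.toChars n).map (fun c => (PySem.Int.ofChars? [c]).getD 0)).sum

def solve (lst : List Int) : Int :=
  aSumDigits (PySem.List.maxD (lst.filter isPrime) (fun x => x) 0)

-- ===== PORT B =====
-- 'for v in sorted(lst, reverse=True): if is_prime(v): best = v; break' (best starts at 0)
def firstPrimeDesc : List Int → Int
  | [] => 0
  | x :: xs => if isPrime x then x else firstPrimeDesc xs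

-- 'while best > 0: best, d = divmod(best, 10); total += d'
def bDigitSum (n : Int) : Int :=
  if 0 < n then PySem.Int.mod n 10 + bDigitSum (PySem.Int.floordiv n 10) else 0
termination_by n.toNat
decreasing_by
  rw [PySem.Int.floordiv_eq_ediv_of_pos (by norm_num : (0:Int) < 10)]
  omega

def solve_alt (lst : List Int) : Int :=
  bDigitSum (firstPrimeDesc (PySem.List.sorted lst (fun x => x) true))

-- ===== PRECONDITION & SPEC =====
def Spec_solve (lst : List Int) (out : Int) : Prop := out = solve_alt lst
instance (lst : List Int) (out : Int) : Decidable (Spec_solve lst out) := by unfold Spec_solve; infer_instance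

-- ===== CLAIM (what is proved, stated in full; the proofs are below) =====
def Claim_equal_solve : Prop := ∀ (lst : List Int), Dom_solve lst → Spec_solve lst (solve lst)

-- ===== LEMMAS AND PROOFS =====

lemma digitVal_digitChar (d : Nat) (h : d < 10) :
    (PySem.Int.ofChars? [Nat.digitChar d]).getD 0 = (d : Int) := by
  interval_cases d <;> decide

lemma bDigitSum_zero : bDigitSum 0 = 0 := by
  rw [bDigitSum]; rfl

lemma toDigitsCore_sum (fuel : Nat) : ∀ (n : Nat) (ds : List Char), n < fuel →
    ((Nat.toDigitsCore 10 fuel n ds).map (fun c => (PySem.Int.ofChars? [c]).getD 0)).sum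
      = bDigitSum (n : Int) + ((ds.map (fun c => (PySem.Int.ofChars? [c]).getD 0)).sum) := by
  induction fuel with
  | zero => intro n ds h; omega
  | succ f ih =>
    intro n ds h
    rw [bDigitSum]
    by_cases h0 : 0 < (n : Int)
    · have hn : 0 < n := by exact_mod_cast h0
      have hm : PySem.Int.mod (n : Int) 10 = ((n % 10 : Nat) : Int) := by
        exact_mod_cast PySem.Int.mod_natCast n 10
      have hd : PySem.Int.floordiv (n : Int) 10 = ((n / 10 : Nat) : Int) := by
        exact_mod_cast PySem.Int.floordiv_natCast n 10
      rw [if_pos h0, hm, hd]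
      show ((Nat.toDigitsCore 10 (f+1) n ds).map _).sum = _
      simp only [Nat.toDigitsCore]
      by_cases hq : n / 10 = 0
      · rw [if_pos hq]
        rw [hq]
        simp only [Nat.cast_zero, bDigitSum_zero, List.map_cons, List.sum_cons,
          digitVal_digitChar (n % 10) (Nat.mod_lt n (by norm_num))]
        ring
      · rw [if_neg hq]
        rw [ih (n / 10) (Nat.digitChar (n % 10) :: ds) (by omega)]
        simp only [List.map_cons, List.sum_cons,
          digitVal_digitChar (n % 10) (Nat.mod_lt n (by norm_num))]
        ring
    · have hn : n = 0 := by omega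
      subst hn
      rw [if_neg h0]
      show ((Nat.toDigitsCore 10 (f+1) 0 ds).map _).sum = _
      simp [Nat.toDigitsCore, digitVal_digitChar 0 (by norm_num)]

lemma aSumDigits_eq_bDigitSum (n : Int) (h : 0 ≤ n) : aSumDigits n = bDigitSum n := by
  unfold aSumDigits
  unfold PySem.Int.toChars
  rw [if_neg (by omega)]
  unfold Nat.toDigits
  rw [toDigitsCore_sum (n.toNat + 1) n.toNat [] (by omega)]
  simp [Int.toNat_of_nonneg h]

lemma isPrime_two_le {n : Int} (h : isPrime n = true) : 2 ≤ n := by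
  unfold isPrime at h
  by_cases h1 : n ≤ 1
  · simp [h1] at h
  · omega

lemma firstPrimeDesc_eq_find? (s : List Int) :
    firstPrimeDesc s = (s.find? isPrime).getD 0 := by
  induction s with
  | nil => rfl
  | cons x xs ih =>
    by_cases hx : isPrime x = true
    · simp [firstPrimeDesc, List.find?, hx]
    · simp only [Bool.not_eq_true] at hx
      simp [firstPrimeDesc, List.find?, hx, ih]

lemma find?_desc_isMax : ∀ {s : List Int} {x : Int},
    List.Pairwise (fun a b => b ≤ a) s → s.find? isPrime = some x →
    ∀ y ∈ s, isPrime y = true → y ≤ x := by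
  intro s
  induction s with
  | nil => intro x _ hf; simp at hf
  | cons a t ih =>
    intro x hp hf y hy hpy
    rcases List.pairwise_cons.mp hp with ⟨ha, ht⟩
    by_cases hpa : isPrime a = true
    · rw [List.find?_cons_of_pos hpa] at hf
      cases hf
      rcases List.mem_cons.mp hy with h | h
      · omega
      · exact ha y h
    · rw [List.find?_cons_of_neg (by simp [hpa])] at hf
      rcases List.mem_cons.mp hy with h | h
      · subst h; exact absurd hpy hpa
      · exact ih ht hf y h hpy

lemma max_eq_firstPrimeDesc (lst : List Int) :
    PySem.List.maxD (lst.filter isPrime) (fun x => x) 0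
      = firstPrimeDesc (PySem.List.sorted lst (fun x => x) true) := by
  set s := PySem.List.sorted lst (fun x => x) true with hs
  have hperm : s.Perm lst := PySem.List.sorted_perm lst (fun x => x) true
  have hpair : List.Pairwise (fun a b => b ≤ a) s :=
    PySem.List.sorted_pairwise_rev lst (fun x => x)
  rw [firstPrimeDesc_eq_find?]
  unfold PySem.List.maxD
  cases hmx : PySem.List.max? (lst.filter isPrime) (fun x => x) with
  | none =>
    have hnil : lst.filter isPrime = [] := (PySem.List.max?_eq_none_iff _ _).mp hmx
    have hnone : s.find? isPrime = none := by
      rw [List.find?_eq_none]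
      intro y hy
      have : y ∈ lst := hperm.mem_iff.mp hy
      intro hpy
      have : y ∈ lst.filter isPrime := List.mem_filter.mpr ⟨this, hpy⟩
      simp [hnil] at this
    simp [hnone]
  | some m =>
    have hmmem := PySem.List.max?_mem hmx
    have hmmax := PySem.List.max?_isMax hmx
    have hpm : isPrime m = true := (List.mem_filter.mp hmmem).2
    have hmlst : m ∈ lst := (List.mem_filter.mp hmmem).1
    have hms : m ∈ s := hperm.mem_iff.mpr hmlst
    -- find? is some: s contains a prime
    cases hf : s.find? isPrime with
    | none =>
      rw [List.find?_eq_none] at hf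
      exact absurd hpm (hf m hms)
    | some x =>
      have hpx : isPrime x = true := List.find?_some hf
      have hxs : x ∈ s := List.mem_of_find?_eq_some hf
      have hxl : x ∈ lst := hperm.mem_iff.mp hxs
      have hxf : x ∈ lst.filter isPrime := List.mem_filter.mpr ⟨hxl, hpx⟩
      have h1 : x ≤ m := hmmax x hxf
      have h2 : m ≤ x := find?_desc_isMax hpair hf m hms hpm
      simp only [Option.getD_some]
      omega

-- ===== VERDICT (by name: the statement is the Claim_ definition above) =====
theorem solve_spec : Claim_equal_solve := by
  intro lst _
  show solve lst = solve_alt lst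
  unfold solve solve_alt
  rw [← max_eq_firstPrimeDesc]
  apply aSumDigits_eq_bDigitSum
  unfold PySem.List.maxD
  cases hmx : PySem.List.max? (lst.filter isPrime) (fun x => x) with
  | none => simp
  | some m =>
    have hpm : isPrime m = true := (List.mem_filter.mp (PySem.List.max?_mem hmx)).2
    have := isPrime_two_le hpm
    simp only [Option.getD_some]
    omega
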